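-- pv_equiv track=rewrite | github.com/pedrofreitascampos/locintel | locintel/graphs/masks/apply/osm.py | __split_paths
-- ===== SOURCE A (Python) =====
-- def __split_paths(edges):
--     paths = []
--
--     path = [edges[0]]
--     end_node = edges[0][-1]
--
--     for edge in edges[1:]:
--         last_node_in_path = end_node
--         start_node, end_node = edge
--
--         if start_node == last_node_in_path:
--             # there is connectivity, extend path
--             path.append(edge)
--         else:
--             paths.append(path)
--             path = [edge]
--
--     paths.append(path)
--
--     return paths
-- ===== SOURCE B (Python) =====
-- def __split_paths(edges):
--     # Build the groups back-to-front by structural recursion instead of a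
--     # stateful left-to-right accumulator loop.
--     head, *tail = edges
--     if not tail:
--         return [[head]]
--     rest = __split_paths(tail)
--     if tail[0][0] == head[1]:
--         rest[0] = [head] + rest[0]
--         return rest
--     return [[head]] + rest
-- ===== Notes on version B (the rewrite author's own statement) =====
-- stated objective: alternative
-- what changed: Replaced A's left-to-right stateful accumulator loop (current path + end_node carried through the iteration) by a structural recursion that builds the grouping back-to-front, prepending the head edge to the first group of the recursively split tail.
import Mathlib
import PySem

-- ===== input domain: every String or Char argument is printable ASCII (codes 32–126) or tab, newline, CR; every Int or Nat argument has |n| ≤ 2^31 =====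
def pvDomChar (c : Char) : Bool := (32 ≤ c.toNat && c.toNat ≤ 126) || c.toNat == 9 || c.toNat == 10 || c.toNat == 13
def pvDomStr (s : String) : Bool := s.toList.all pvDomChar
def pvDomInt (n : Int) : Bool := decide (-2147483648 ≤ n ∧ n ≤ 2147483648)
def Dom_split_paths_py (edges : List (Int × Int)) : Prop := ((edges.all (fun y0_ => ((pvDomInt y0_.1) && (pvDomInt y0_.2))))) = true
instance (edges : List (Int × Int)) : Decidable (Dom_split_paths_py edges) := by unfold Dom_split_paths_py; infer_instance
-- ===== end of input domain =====

-- B rebuilds the split back-to-front by structural recursion instead of A's stateful accumulator loop (alternative decomposition, same cost).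
-- ===== PORT A =====
def pvAStep (st : List (List (Int × Int)) × List (Int × Int) × Int) (edge : Int × Int) :
    List (List (Int × Int)) × List (Int × Int) × Int :=
  let (paths, path, endNode) := st
  -- last_node_in_path = end_node; start_node, end_node = edge
  if edge.1 = endNode then (paths, path ++ [edge], edge.2)
  else (paths ++ [path], [edge], edge.2)

def split_paths_py (edges : List (Int × Int)) : List (List (Int × Int)) :=
  match edges with
  | [] => []   -- Python raises IndexError on edges[0]; excluded by Pre_
  | e0 :: _ =>
    let st := (PySem.List.slice edges (some 1) none).foldl pvAStep ([], [e0], e0.2)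
    st.1 ++ [st.2.1]

-- ===== PORT B =====
def split_paths_py_alt : List (Int × Int) → List (List (Int × Int))
  | [] => []   -- Python raises ValueError on unpacking; excluded by Pre_
  | [e] => [[e]]
  | e :: e2 :: t =>
    let rest := split_paths_py_alt (e2 :: t)
    if e2.1 = e.2 then
      match rest with
      | [] => []          -- unreachable: rest is always nonempty
      | p :: ps => (e :: p) :: ps
    else [e] :: rest

-- ===== PRECONDITION & SPEC =====
-- A raises IndexError on the empty list (edges[0]); B raises ValueError there.
def Pre_split_paths_py (edges : List (Int × Int)) : Prop := edges ≠ []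
instance (edges : List (Int × Int)) : Decidable (Pre_split_paths_py edges) := by unfold Pre_split_paths_py; infer_instance
def pvWitness_split_paths_py : (List (Int × Int)) := [((0 : Int), (1 : Int)), ((1 : Int), (2 : Int)), ((5 : Int), (6 : Int))]

def Spec_split_paths_py (edges : List (Int × Int)) (out : List (List (Int × Int))) : Prop := out = split_paths_py_alt edges
instance (edges : List (Int × Int)) (out : List (List (Int × Int))) : Decidable (Spec_split_paths_py edges out) := by unfold Spec_split_paths_py; infer_instance

-- ===== CLAIM (what is proved, stated in full; the proofs are below) =====
def Claim_equal_split_paths_py : Prop := ∀ (edges : List (Int × Int)), Dom_split_paths_py edges → Pre_split_paths_py edges → Spec_split_paths_py edges (split_paths_py edges)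

-- ===== LEMMAS AND PROOFS =====

-- the grouping A's loop computes, as a tail recursion over the remaining edges
def pvGrp (path : List (Int × Int)) (e : Int) : List (Int × Int) → List (List (Int × Int))
  | [] => [path]
  | x :: l => if x.1 = e then pvGrp (path ++ [x]) x.2 l else path :: pvGrp [x] x.2 l

theorem pvFoldl_grp (l : List (Int × Int)) : ∀ (paths : List (List (Int × Int))) (path : List (Int × Int)) (e : Int),
    (l.foldl pvAStep (paths, path, e)).1 ++ [(l.foldl pvAStep (paths, path, e)).2.1]
      = paths ++ pvGrp path e l := by
  induction l with
  | nil => intro paths path e; simp [pvGrp]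
  | cons x l ih =>
    intro paths path e
    by_cases h : x.1 = e
    · simp [pvAStep, pvGrp, h, ih]
    · simp [pvAStep, pvGrp, h, ih]

theorem pvGrp_prepend (l : List (Int × Int)) : ∀ (e : Int) (p q : List (Int × Int)),
    pvGrp (p ++ q) e l = match pvGrp q e l with
      | [] => []
      | g :: gs => (p ++ g) :: gs := by
  induction l with
  | nil => intro e p q; simp [pvGrp]
  | cons x l ih =>
    intro e p q
    by_cases h : x.1 = e
    · have := ih x.2 p (q ++ [x])
      simp [pvGrp, h] at this ⊢
      exact this
    · simp [pvGrp, h]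

theorem pvGrp_alt (l : List (Int × Int)) : ∀ (x : Int × Int),
    pvGrp [x] x.2 l = split_paths_py_alt (x :: l) := by
  induction l with
  | nil => intro x; simp [pvGrp, split_paths_py_alt]
  | cons y l ih =>
    intro x
    by_cases h : y.1 = x.2
    · have hp := pvGrp_prepend l y.2 [x] [y]
      simp [pvGrp, h, split_paths_py_alt]
      rw [show ([x, y] : List (Int × Int)) = [x] ++ [y] from rfl, hp, ih y]
      cases split_paths_py_alt (y :: l) <;> simp
    · simp [pvGrp, h, split_paths_py_alt, ih y]

-- ===== VERDICT (by name: the statement is the Claim_ definition above) =====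
theorem split_paths_py_spec : Claim_equal_split_paths_py := by
  intro edges _ hpre
  unfold Spec_split_paths_py
  match edges with
  | [] => exact absurd rfl hpre
  | e0 :: t =>
    show ((PySem.List.slice (e0 :: t) (some 1) none).foldl pvAStep ([], [e0], e0.2)).1
        ++ [((PySem.List.slice (e0 :: t) (some 1) none).foldl pvAStep ([], [e0], e0.2)).2.1]
        = split_paths_py_alt (e0 :: t)
    rw [PySem.List.slice_from_one]
    show (t.foldl pvAStep ([], [e0], e0.2)).1 ++ [(t.foldl pvAStep ([], [e0], e0.2)).2.1]
        = split_paths_py_alt (e0 :: t)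
    rw [pvFoldl_grp, pvGrp_alt]
    simp
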